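-- pv_equiv track=rewrite | github.com/wnwoghd22/functiongemma-hackathon | strategies/strategy_on_device_only_v31.py | _prune_tools
-- ===== SOURCE A (Python) =====
-- _TOOL_KEYWORDS = {
--     "get_weather": ["weather", "temperature", "forecast"],
--     "set_alarm": ["alarm", "wake me", "wake up"],
--     "send_message": ["message", "text ", "send ", "tell ", "saying", "msg"],
--     "create_reminder": ["remind", "reminder"],
--     "search_contacts": ["contact", "look up", "find "],
--     "play_music": ["play ", "music", "song", "listen"],
--     "set_timer": ["timer", "countdown"],
-- }
--
-- def _prune_tools(user_text, tools):
--     text_lower = user_text.lower()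
--     matched = set()
--     for tool_name, keywords in _TOOL_KEYWORDS.items():
--         for kw in keywords:
--             if kw in text_lower:
--                 matched.add(tool_name)
--                 break
--     if not matched:
--         return tools
--     pruned = [t for t in tools if t.get("name") in matched]
--     return pruned if pruned else tools
-- ===== SOURCE B (Python) =====
-- _TOOL_KEYWORDS = {
--     "get_weather": ["weather", "temperature", "forecast"],
--     "set_alarm": ["alarm", "wake me", "wake up"],
--     "send_message": ["message", "text ", "send ", "tell ", "saying", "msg"],
--     "create_reminder": ["remind", "reminder"],
--     "search_contacts": ["contact", "look up", "find "],
--     "play_music": ["play ", "music", "song", "listen"],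
--     "set_timer": ["timer", "countdown"],
-- }
--
-- def _prune_tools(user_text, tools):
--     text_lower = user_text.lower()
--     pruned = [t for t in tools
--               if any(kw in text_lower
--                      for kw in _TOOL_KEYWORDS.get(t.get("name"), []))]
--     return pruned if pruned else tools
-- ===== Notes on version B (the rewrite author's own statement) =====
-- stated objective: simpler
-- what changed: Single pass over the tools: each tool's own keyword list is looked up directly in the keyword dict, removing A's separately-built matched-name set and its redundant empty-match guard.
import Mathlib
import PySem

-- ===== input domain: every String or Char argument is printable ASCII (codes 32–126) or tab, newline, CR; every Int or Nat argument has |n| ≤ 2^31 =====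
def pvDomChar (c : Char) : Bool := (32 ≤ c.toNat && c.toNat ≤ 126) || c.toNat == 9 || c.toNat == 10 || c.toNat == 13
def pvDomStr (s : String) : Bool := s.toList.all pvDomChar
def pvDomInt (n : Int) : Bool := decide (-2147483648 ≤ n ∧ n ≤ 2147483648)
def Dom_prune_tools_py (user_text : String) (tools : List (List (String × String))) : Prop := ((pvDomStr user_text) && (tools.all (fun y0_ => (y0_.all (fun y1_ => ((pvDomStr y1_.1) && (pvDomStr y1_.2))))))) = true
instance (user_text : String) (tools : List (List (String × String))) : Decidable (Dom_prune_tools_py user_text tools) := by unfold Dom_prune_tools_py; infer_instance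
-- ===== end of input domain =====

-- B replaces A's separately-built matched-name set (and its redundant empty-match guard) by one
-- filtering pass that looks each tool's keyword list up directly in the keyword dict (objective: simpler).


-- module constant _TOOL_KEYWORDS (shared by both programs)
def pvToolKeywords : List (String × List String) :=
  [("get_weather", ["weather", "temperature", "forecast"]),
   ("set_alarm", ["alarm", "wake me", "wake up"]),
   ("send_message", ["message", "text ", "send ", "tell ", "saying", "msg"]),
   ("create_reminder", ["remind", "reminder"]),
   ("search_contacts", ["contact", "look up", "find "]),
   ("play_music", ["play ", "music", "song", "listen"]),
   ("set_timer", ["timer", "countdown"])]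

-- ===== PORT A =====
-- the inner 'for kw in keywords: if kw in text_lower: … break' is 'keywords.any (kw in text_lower)'
def prune_tools_py (user_text : String) (tools : List (List (String × String))) : List (List (String × String)) :=
  let text_lower := PySem.Str.lower user_text
  let matched : PySem.Set String :=
    pvToolKeywords.foldl
      (fun m p => if p.2.any (fun kw => PySem.Str.isIn kw text_lower) then m.add p.1 else m)
      PySem.Set.empty
  if matched.isEmpty then tools
  else
    let pruned := tools.filter (fun t =>
      match (PySem.Dict.mk t).get? "name" with
      | some n => matched.contains n
      | none => false)
    if pruned.isEmpty then tools else pruned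

-- ===== PORT B =====
-- t.get("name") may be absent: _TOOL_KEYWORDS.get(None, []) is [] (keys are strings), ported by the none branch
def prune_tools_py_alt (user_text : String) (tools : List (List (String × String))) : List (List (String × String)) :=
  let text_lower := PySem.Str.lower user_text
  let pruned := tools.filter (fun t =>
    (match (PySem.Dict.mk t).get? "name" with
     | some n => (PySem.Dict.mk pvToolKeywords).getD n []
     | none => ([] : List String)).any (fun kw => PySem.Str.isIn kw text_lower))
  if pruned.isEmpty then tools else pruned

-- ===== PRECONDITION & SPEC =====
def Spec_prune_tools_py (user_text : String) (tools : List (List (String × String))) (out : List (List (String × String))) : Prop := out = prune_tools_py_alt user_text tools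
instance (user_text : String) (tools : List (List (String × String))) (out : List (List (String × String))) : Decidable (Spec_prune_tools_py user_text tools out) := by unfold Spec_prune_tools_py; infer_instance

-- ===== CLAIM (what is proved, stated in full; the proofs are below) =====
def Claim_equal_prune_tools_py : Prop := ∀ (user_text : String) (tools : List (List (String × String))), Dom_prune_tools_py user_text tools → Spec_prune_tools_py user_text tools (prune_tools_py user_text tools)

-- ===== LEMMAS AND PROOFS =====

theorem pv_contains_add (s : PySem.Set String) (x y : String) :
    PySem.Set.contains (s.add x) y = (PySem.Set.contains s y || y == x) := by
  rw [Bool.eq_iff_iff]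
  simp [PySem.Set.mem_add]

-- A's matched-set membership, for an arbitrary keyword table folded over an arbitrary start set
theorem pv_contains_fold (tl : String) (l : List (String × List String))
    (s : PySem.Set String) (n : String) :
    PySem.Set.contains
      (l.foldl (fun m p => if p.2.any (fun kw => PySem.Str.isIn kw tl) then m.add p.1 else m) s) n
      = (PySem.Set.contains s n
         || l.any (fun p => p.1 == n && p.2.any (fun kw => PySem.Str.isIn kw tl))) := by
  induction l generalizing s with
  | nil => simp
  | cons p rest ih =>
    by_cases h : p.2.any (fun kw => PySem.Str.isIn kw tl) = true
    · rw [List.foldl_cons, if_pos h, ih, pv_contains_add, List.any_cons, h]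
      cases PySem.Set.contains s n <;> cases hb : (n == p.1) <;>
        simp [BEq.comm] at hb ⊢ <;> simp [hb]
    · rw [List.foldl_cons, if_neg h, ih, List.any_cons,
          Bool.eq_false_iff.mpr h, Bool.and_false, Bool.false_or]

-- the scan of the keyword table equals the direct dict lookup, given distinct keys
theorem pv_any_eq_getD (tl : String) (l : List (String × List String))
    (hn : (l.map Prod.fst).Nodup) (n : String) :
    l.any (fun p => p.1 == n && p.2.any (fun kw => PySem.Str.isIn kw tl))
        = ((PySem.Dict.mk l).getD n []).any (fun kw => PySem.Str.isIn kw tl) ∨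
      (l.any (fun p => p.1 == n && p.2.any (fun kw => PySem.Str.isIn kw tl)) = false ∧
        (PySem.Dict.mk l).get? n = none) := by
  induction l with
  | nil => right; simp [PySem.Dict.get?]
  | cons p rest ih =>
    simp only [List.map_cons, List.nodup_cons] at hn
    by_cases hk : (p.1 == n) = true
    · left
      have hrest : (rest.any fun q => q.1 == n && q.2.any (fun kw => PySem.Str.isIn kw tl))
          = false := by
        simp only [List.any_eq_false]
        intro q hq
        have : q.1 ≠ n := by
          intro he; exact hn.1 (by rw [eq_of_beq hk, ← he]; exact List.mem_map_of_mem hq)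
        simp [this]
      rw [List.any_cons, hk, Bool.true_and, hrest, Bool.or_false,
          PySem.Dict.getD_eq_get?_getD, PySem.Dict.get?_mk_cons, if_pos hk]
      rfl
    · have hk' : (p.1 == n) = false := by simpa using hk
      have hg : (PySem.Dict.mk (p :: rest)).get? n = (PySem.Dict.mk rest).get? n := by
        rw [PySem.Dict.get?_mk_cons, hk']; simp
      rcases ih hn.2 with h | ⟨h1, h2⟩
      · left
        rw [List.any_cons, hk', Bool.false_and, Bool.false_or,
            PySem.Dict.getD_eq_get?_getD, hg, ← PySem.Dict.getD_eq_get?_getD]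
        exact h
      · right
        refine ⟨?_, by rw [hg]; exact h2⟩
        rw [List.any_cons, hk', Bool.false_and, Bool.false_or]
        exact h1

-- the two filter predicates agree on every tool
theorem pv_pred_eq (tl : String) (t : List (String × String)) :
    (match (PySem.Dict.mk t).get? "name" with
     | some n => PySem.Set.contains
         (pvToolKeywords.foldl
           (fun m p => if p.2.any (fun kw => PySem.Str.isIn kw tl) then m.add p.1 else m)
           PySem.Set.empty) n
     | none => false)
    = (match (PySem.Dict.mk t).get? "name" with
       | some n => (PySem.Dict.mk pvToolKeywords).getD n []
       | none => ([] : List String)).any (fun kw => PySem.Str.isIn kw tl) := by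
  cases hg : (PySem.Dict.mk t).get? "name" with
  | none => simp
  | some n =>
    simp only []
    rw [pv_contains_fold]
    have hnodup : (pvToolKeywords.map Prod.fst).Nodup := by decide
    rcases pv_any_eq_getD tl pvToolKeywords hnodup n with h | ⟨h1, h2⟩
    · rw [← h]
      cases hc : PySem.Set.contains (PySem.Set.empty : PySem.Set String) n <;>
        simp at hc ⊢
    · have hd : (PySem.Dict.mk pvToolKeywords).getD n [] = [] := by
        rw [PySem.Dict.getD_eq_get?_getD, h2]; rfl
      rw [hd, h1]
      cases hc : PySem.Set.contains (PySem.Set.empty : PySem.Set String) n <;>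
        simp at hc ⊢

-- ===== VERDICT (by name: the statement is the Claim_ definition above) =====
theorem prune_tools_py_spec : Claim_equal_prune_tools_py := by
  intro user_text tools _
  unfold Spec_prune_tools_py prune_tools_py prune_tools_py_alt
  simp only []
  set tl := PySem.Str.lower user_text with htl
  set matched := pvToolKeywords.foldl
      (fun m p => if p.2.any (fun kw => PySem.Str.isIn kw tl) then m.add p.1 else m)
      PySem.Set.empty with hm
  have hfilter : tools.filter (fun t =>
      match (PySem.Dict.mk t).get? "name" with
      | some n => matched.contains n
      | none => false)
    = tools.filter (fun t =>
      (match (PySem.Dict.mk t).get? "name" with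
       | some n => (PySem.Dict.mk pvToolKeywords).getD n []
       | none => ([] : List String)).any (fun kw => PySem.Str.isIn kw tl)) := by
    apply List.filter_congr
    intro t _
    exact pv_pred_eq tl t
  by_cases he : matched.isEmpty
  · -- no keyword matched: both sides return tools
    have hnilm : (matched : List String) = [] := List.isEmpty_iff.mp he
    have hcf : ∀ t, (match (PySem.Dict.mk t).get? "name" with
        | some n => matched.contains n
        | none => false) = false := by
      intro t
      cases hg : (PySem.Dict.mk t).get? "name" with
      | none => rfl
      | some n =>
        simp only []
        rw [PySem.Set.contains_eq_listContains, hnilm]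
        rfl
    have hnil : tools.filter (fun t =>
        (match (PySem.Dict.mk t).get? "name" with
         | some n => (PySem.Dict.mk pvToolKeywords).getD n []
         | none => ([] : List String)).any (fun kw => PySem.Str.isIn kw tl)) = [] := by
      rw [← hfilter]
      refine List.filter_eq_nil_iff.mpr (fun t _ h => ?_)
      rw [hcf t] at h
      cases h
    rw [if_pos he, hnil]
    rfl
  · rw [if_neg he, hfilter]
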